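-- pv_equiv track=rewrite | github.com/xbodyax015-stack/bot | bot.py | validate_activation_code
-- ===== SOURCE A (Python) =====
-- import string as str_module
--
-- def validate_activation_code(code: str) -> bool:
--     """Проверяет код активации по паттерну"""
--     if not code or len(code) != 8:
--         return False
--     code = code.upper()
--     if code[1] not in ['R', 'B']:
--         return False
--     if code[7] not in ['7', '4']:
--         return False
--     for c in code:
--         if c not in str_module.ascii_uppercase + str_module.digits:
--             return False
--     return True
-- ===== SOURCE B (Python) =====
-- import re
--
-- _PATTERN = re.compile(r'[A-Z0-9][RB][A-Z0-9]{5}[74]')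
--
-- def validate_activation_code(code: str) -> bool:
--     """Проверяет код активации по паттерну"""
--     return _PATTERN.fullmatch(code.upper()) is not None
-- ===== Notes on version B (the rewrite author's own statement) =====
-- stated objective: idiomatic
-- what changed: Replaces the explicit length guard, per-index membership branches and the character-scan loop with a single precompiled re.fullmatch of the pattern [A-Z0-9][RB][A-Z0-9]{5}[74] on the uppercased input (the 8-position pattern subsumes the length check).
import Mathlib
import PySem

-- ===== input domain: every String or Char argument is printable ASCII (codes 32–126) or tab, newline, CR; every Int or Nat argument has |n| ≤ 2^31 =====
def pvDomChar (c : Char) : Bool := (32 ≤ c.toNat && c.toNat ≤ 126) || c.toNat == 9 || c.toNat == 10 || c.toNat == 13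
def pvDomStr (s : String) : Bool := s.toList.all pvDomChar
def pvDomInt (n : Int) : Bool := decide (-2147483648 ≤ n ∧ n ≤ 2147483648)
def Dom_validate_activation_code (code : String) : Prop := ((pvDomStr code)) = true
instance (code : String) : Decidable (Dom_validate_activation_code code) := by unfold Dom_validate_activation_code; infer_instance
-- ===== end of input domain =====

-- B replaces A's length guard, positional branches and character-scan loop with a single
-- declarative full-pattern match (regex [A-Z0-9][RB][A-Z0-9]{5}[74]); same return value everywhere.

-- ===== PORT A =====
-- str_module.ascii_uppercase + str_module.digits, as a char list
def pvAlnumA : List Char := "ABCDEFGHIJKLMNOPQRSTUVWXYZ0123456789".toList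

-- 'for c in code: if c not in …: return False' then 'return True'
def pvScanA : List Char → Bool
  | [] => true
  | c :: rest => if !(pvAlnumA.contains c) then false else pvScanA rest

def validate_activation_code (code : String) : Bool :=
  if code.toList = [] || PySem.Str.len code ≠ 8 then false
  else
    let c := PySem.Str.upper code
    if !(PySem.Str.pyGet? c 1 = some 'R' || PySem.Str.pyGet? c 1 = some 'B') then false
    else if !(PySem.Str.pyGet? c 7 = some '7' || PySem.Str.pyGet? c 7 = some '4') then false
    else pvScanA c.toList

-- ===== PORT B =====
-- the regex character class [A-Z0-9]
def pvClassAZ09 (c : Char) : Bool := ('A' ≤ c && c ≤ 'Z') || ('0' ≤ c && c ≤ '9')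

-- re.fullmatch(r'[A-Z0-9][RB][A-Z0-9]{5}[74]', code.upper()) is not None,
-- ported by hand (exact: the pattern has 8 literal positions, one character class each,
-- so fullmatch succeeds iff the string has exactly 8 chars each in its class)
def validate_activation_code_alt (code : String) : Bool :=
  match (PySem.Str.upper code).toList with
  | [c0, c1, c2, c3, c4, c5, c6, c7] =>
      pvClassAZ09 c0 && (c1 == 'R' || c1 == 'B') &&
      pvClassAZ09 c2 && pvClassAZ09 c3 && pvClassAZ09 c4 &&
      pvClassAZ09 c5 && pvClassAZ09 c6 && (c7 == '7' || c7 == '4')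
  | _ => false

-- ===== PRECONDITION & SPEC =====
def Spec_validate_activation_code (code : String) (out : Bool) : Prop := out = validate_activation_code_alt code
instance (code : String) (out : Bool) : Decidable (Spec_validate_activation_code code out) := by unfold Spec_validate_activation_code; infer_instance

-- ===== CLAIM (what is proved, stated in full; the proofs are below) =====
def Claim_equal_validate_activation_code : Prop := ∀ (code : String), Dom_validate_activation_code code → Spec_validate_activation_code code (validate_activation_code code)

-- ===== LEMMAS AND PROOFS =====

theorem pvAlnum_eq_class (c : Char) : pvAlnumA.contains c = pvClassAZ09 c := by
  have h : pvAlnumA = ['A','B','C','D','E','F','G','H','I','J','K','L','M','N','O','P','Q','R','S','T','U','V','W','X','Y','Z','0','1','2','3','4','5','6','7','8','9'] := by decide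
  rw [h, Bool.eq_iff_iff]
  simp only [pvClassAZ09, List.contains_eq_mem, decide_eq_true_eq,
    Bool.or_eq_true, Bool.and_eq_true, List.mem_cons, List.not_mem_nil, or_false,
    Char.le_def, Char.ext_iff, UInt32.le_iff_toNat_le, UInt32.ext_iff]
  simp only [Char.reduceVal, UInt32.reduceToNat]
  omega

theorem upper_len (l : List Char) : (PySem.Chars.upper l).length = l.length := by
  simp [PySem.Chars.upper]

theorem pv_main (code : String) : validate_activation_code code = validate_activation_code_alt code := by
  unfold validate_activation_code validate_activation_code_alt
  have hu : (PySem.Str.upper code).toList = PySem.Chars.upper code.toList := by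
    simp [PySem.Str.toList_upper]
  by_cases h8 : code.toList.length = 8
  · have hul : (PySem.Str.upper code).toList.length = 8 := by rw [hu, upper_len, h8]
    obtain ⟨c0,c1,c2,c3,c4,c5,c6,c7,hlist⟩ :
        ∃ c0 c1 c2 c3 c4 c5 c6 c7, (PySem.Str.upper code).toList = [c0,c1,c2,c3,c4,c5,c6,c7] := by
      rcases hl : (PySem.Str.upper code).toList
        with _|⟨c0,_|⟨c1,_|⟨c2,_|⟨c3,_|⟨c4,_|⟨c5,_|⟨c6,_|⟨c7,_|⟨c8,t⟩⟩⟩⟩⟩⟩⟩⟩⟩ <;>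
        rw [hl] at hul <;> simp at hul
      exact ⟨c0,c1,c2,c3,c4,c5,c6,c7,rfl⟩
    have hne : code.toList ≠ [] := by intro h; rw [h] at h8; simp at h8
    have hlen : PySem.Str.len code = 8 := by simp [PySem.Str.len_eq, h8]
    rw [hlist]
    have hidx1 : PySem.List.pyIdx? 8 1 = some 1 := by decide
    have hidx7 : PySem.List.pyIdx? 8 7 = some 7 := by decide
    have g1 : PySem.Str.pyGet? (PySem.Str.upper code) 1 = some c1 := by
      simp [PySem.Str.pyGet?_eq, hlist, PySem.Chars.pyGet?, PySem.List.pyGet?, hidx1]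
    have g7 : PySem.Str.pyGet? (PySem.Str.upper code) 7 = some c7 := by
      simp [PySem.Str.pyGet?_eq, hlist, PySem.Chars.pyGet?, PySem.List.pyGet?, hidx7]
    clear hu hul
    simp only [g1, g7, hlist, hlen, hne, pvScanA, pvAlnum_eq_class]
    have cR : pvClassAZ09 'R' = true := by decide
    have cB : pvClassAZ09 'B' = true := by decide
    have c7' : pvClassAZ09 '7' = true := by decide
    have c4' : pvClassAZ09 '4' = true := by decide
    clear g1 g7 hne hlen h8 hidx1 hidx7 hlist
    clear code
    by_cases e1 : c1 = 'R' ∨ c1 = 'B'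
    · by_cases e7 : c7 = '7' ∨ c7 = '4'
      · rcases e1 with rfl | rfl <;> rcases e7 with rfl | rfl <;>
          simp only [Option.some.injEq, decide_true, decide_false, reduceCtorEq, ne_eq,
            Bool.or_true, Bool.true_or, Bool.or_false, Bool.false_or, Bool.not_true,
            Bool.not_false, if_false, if_true, reduceIte, beq_self_eq_true,
            Bool.and_true, Bool.true_and] <;>
          simp only [cR, cB, c7', c4', Bool.not_true, Bool.if_true_left,
            Bool.true_or, Bool.or_true, Bool.true_and, Bool.and_true, if_false, reduceIte] <;>
          (cases h0 : pvClassAZ09 c0 <;> cases h2 : pvClassAZ09 c2 <;>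
             cases h3 : pvClassAZ09 c3 <;> cases h4 : pvClassAZ09 c4 <;>
             cases h5 : pvClassAZ09 c5 <;> cases h6 : pvClassAZ09 c6 <;> simp_all)
      · push_neg at e7
        simp [e7.1, e7.2]
    · push_neg at e1
      simp [e1.1, e1.2]
  · have hg : (code.toList = [] || PySem.Str.len code ≠ 8) = true := by
      simp [PySem.Str.len_eq]
      right; exact_mod_cast h8
    have hB : (PySem.Str.upper code).toList.length ≠ 8 := by
      rw [hu, upper_len]; exact h8
    simp only [hg, reduceIte]
    rcases hl : (PySem.Str.upper code).toList
      with _|⟨c0,_|⟨c1,_|⟨c2,_|⟨c3,_|⟨c4,_|⟨c5,_|⟨c6,_|⟨c7,_|⟨c8,t⟩⟩⟩⟩⟩⟩⟩⟩⟩ <;>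
      first
        | rfl
        | (rw [hl] at hB; exact absurd rfl hB)

-- ===== VERDICT (by name: the statement is the Claim_ definition above) =====
theorem validate_activation_code_spec : Claim_equal_validate_activation_code := by
  intro code _
  unfold Spec_validate_activation_code
  exact pv_main code
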